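-- pv_equiv track=rewrite | github.com/sleevefishcode/ScalableTUL | ScaleTUL_code/preprocess.py | merge_daily_to_twoweekly
-- ===== SOURCE A (Python) =====
-- def merge_daily_to_twoweekly(user_traj,train_nums):
--     weekly_traj = []
--     week_traj, week_time, week_category = [], [], []
--     week_idx = 0
--
--     for day_traj, day_time, day_category, _ in user_traj:
--         week_traj.extend(day_traj)
--         week_time.extend(day_time)
--         week_category.extend(day_category)
--
--
--         if len(week_traj) >= 14:
--             weekly_traj.append((week_traj, week_time, week_category, week_idx))
--             train_nums += 1
--             week_traj, week_time, week_category = [], [], []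
--             week_idx += 1
--
--     if  len(week_traj)>7:
--         weekly_traj.append((week_traj, week_time, week_category, week_idx))
--         train_nums += 1
--
--     return weekly_traj,train_nums
-- ===== SOURCE B (Python) =====
-- def merge_daily_to_twoweekly(user_traj, train_nums):
--     # pass 1: greedily partition the days into chunks by cumulative point count
--     chunks = []
--     cur, acc = [], 0
--     for day in user_traj:
--         cur.append(day)
--         acc += len(day[0])
--         if acc >= 14:
--             chunks.append(cur)
--             cur, acc = [], 0
--     if acc > 7:
--         chunks.append(cur)
--     # pass 2: merge each chunk, index by position
--     weekly_traj = [
--         ([x for d in c for x in d[0]],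
--          [x for d in c for x in d[1]],
--          [x for d in c for x in d[2]],
--          i)
--         for i, c in enumerate(chunks)
--     ]
--     return weekly_traj, train_nums + len(chunks)
-- ===== Notes on version B (the rewrite author's own statement) =====
-- stated objective: alternative
-- what changed: Replaces A's single interleaved accumulate-and-flush loop over merged point lists with a two-pass decomposition: first greedily partition the days into chunks using a running point count, then merge each chunk and assign week indices by enumerate, adding len(chunks) to train_nums at once.
import Mathlib
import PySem

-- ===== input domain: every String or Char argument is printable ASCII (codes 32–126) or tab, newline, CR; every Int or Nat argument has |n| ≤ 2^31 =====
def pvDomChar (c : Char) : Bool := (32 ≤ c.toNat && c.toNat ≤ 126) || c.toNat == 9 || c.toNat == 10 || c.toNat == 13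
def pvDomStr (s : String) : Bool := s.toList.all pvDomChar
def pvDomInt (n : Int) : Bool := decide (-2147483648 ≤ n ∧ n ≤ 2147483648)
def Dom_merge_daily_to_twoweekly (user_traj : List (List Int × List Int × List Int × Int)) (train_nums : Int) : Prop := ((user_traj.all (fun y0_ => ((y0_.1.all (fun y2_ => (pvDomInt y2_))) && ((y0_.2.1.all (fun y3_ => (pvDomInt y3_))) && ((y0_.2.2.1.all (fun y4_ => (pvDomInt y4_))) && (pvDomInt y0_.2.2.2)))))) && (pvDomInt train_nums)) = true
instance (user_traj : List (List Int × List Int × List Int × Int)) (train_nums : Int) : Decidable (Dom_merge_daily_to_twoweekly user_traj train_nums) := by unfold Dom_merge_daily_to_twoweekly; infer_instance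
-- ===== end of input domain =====

-- B replaces A's interleaved accumulate-and-flush loop by a two-pass decomposition
-- (greedily chunk the days, then merge each chunk with enumerate); objective: alternative.

-- ===== PORT A =====
def merge_daily_to_twoweekly (user_traj : List (List Int × List Int × List Int × Int)) (train_nums : Int) : (List (List Int × List Int × List Int × Int)) × Int :=
  let st := user_traj.foldl
    (fun (st : List (List Int × List Int × List Int × Int) × List Int × List Int × List Int × Int × Int) day =>
      match st with
      | (weekly, wt, wtm, wc, idx, tn) =>
        let wt := wt ++ day.1
        let wtm := wtm ++ day.2.1
        let wc := wc ++ day.2.2.1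
        if wt.length ≥ 14 then
          (weekly ++ [(wt, wtm, wc, idx)], ([] : List Int), ([] : List Int), ([] : List Int), idx + 1, tn + 1)
        else
          (weekly, wt, wtm, wc, idx, tn))
    (([] : List (List Int × List Int × List Int × Int)), ([] : List Int), ([] : List Int), ([] : List Int), (0 : Int), train_nums)
  match st with
  | (weekly, wt, wtm, wc, idx, tn) =>
    if wt.length > 7 then (weekly ++ [(wt, wtm, wc, idx)], tn + 1) else (weekly, tn)

-- ===== PORT B =====
def merge_daily_to_twoweekly_alt (user_traj : List (List Int × List Int × List Int × Int)) (train_nums : Int) : (List (List Int × List Int × List Int × Int)) × Int :=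
  -- pass 1: greedily partition the days into chunks by cumulative point count
  let st := user_traj.foldl
    (fun (st : List (List (List Int × List Int × List Int × Int)) × List (List Int × List Int × List Int × Int) × Int) day =>
      match st with
      | (chunks, cur, acc) =>
        let cur := cur ++ [day]
        let acc := acc + (day.1.length : Int)
        if acc ≥ 14 then (chunks ++ [cur], [], 0) else (chunks, cur, acc))
    ([], [], 0)
  match st with
  | (chunks, cur, acc) =>
    let chunks := if acc > 7 then chunks ++ [cur] else chunks
    -- pass 2: merge each chunk, index by position
    ((PySem.List.enumerate chunks 0).map
        (fun p => (p.2.flatMap (fun d => d.1), p.2.flatMap (fun d => d.2.1), p.2.flatMap (fun d => d.2.2.1), p.1)),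
     train_nums + (chunks.length : Int))

-- ===== PRECONDITION & SPEC =====
def Spec_merge_daily_to_twoweekly (user_traj : List (List Int × List Int × List Int × Int)) (train_nums : Int) (out : (List (List Int × List Int × List Int × Int)) × Int) : Prop := out = merge_daily_to_twoweekly_alt user_traj train_nums
instance (user_traj : List (List Int × List Int × List Int × Int)) (train_nums : Int) (out : (List (List Int × List Int × List Int × Int)) × Int) : Decidable (Spec_merge_daily_to_twoweekly user_traj train_nums out) := by unfold Spec_merge_daily_to_twoweekly; infer_instance

-- ===== CLAIM (what is proved, stated in full; the proofs are below) =====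
def Claim_equal_merge_daily_to_twoweekly : Prop := ∀ (user_traj : List (List Int × List Int × List Int × Int)) (train_nums : Int), Dom_merge_daily_to_twoweekly user_traj train_nums → Spec_merge_daily_to_twoweekly user_traj train_nums (merge_daily_to_twoweekly user_traj train_nums)

-- ===== LEMMAS AND PROOFS =====

abbrev pvDay := List Int × List Int × List Int × Int

def pvStepA (st : List pvDay × List Int × List Int × List Int × Int × Int) (day : pvDay) :
    List pvDay × List Int × List Int × List Int × Int × Int :=
  match st with
  | (weekly, wt, wtm, wc, idx, tn) =>
    let wt := wt ++ day.1
    let wtm := wtm ++ day.2.1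
    let wc := wc ++ day.2.2.1
    if wt.length ≥ 14 then
      (weekly ++ [(wt, wtm, wc, idx)], ([] : List Int), ([] : List Int), ([] : List Int), idx + 1, tn + 1)
    else
      (weekly, wt, wtm, wc, idx, tn)

def pvStepB (st : List (List pvDay) × List pvDay × Int) (day : pvDay) :
    List (List pvDay) × List pvDay × Int :=
  match st with
  | (chunks, cur, acc) =>
    let cur := cur ++ [day]
    let acc := acc + (day.1.length : Int)
    if acc ≥ 14 then (chunks ++ [cur], [], 0) else (chunks, cur, acc)

def pvF1 (c : List pvDay) : List Int := c.flatMap (fun d => d.1)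
def pvF2 (c : List pvDay) : List Int := c.flatMap (fun d => d.2.1)
def pvF3 (c : List pvDay) : List Int := c.flatMap (fun d => d.2.2.1)

def pvRender (chs : List (List pvDay)) : List pvDay :=
  (PySem.List.enumerate chs 0).map
    (fun p => (p.2.flatMap (fun d => d.1), p.2.flatMap (fun d => d.2.1), p.2.flatMap (fun d => d.2.2.1), p.1))

lemma pvRender_append (chs : List (List pvDay)) (c : List pvDay) :
    pvRender (chs ++ [c]) = pvRender chs ++ [(pvF1 c, pvF2 c, pvF3 c, (chs.length : Int))] := by
  simp [pvRender, PySem.List.enumerate_append, PySem.List.enumerate_cons, PySem.List.enumerate_nil,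
        pvF1, pvF2, pvF3]

lemma pvF1_append (cur : List pvDay) (d : pvDay) : pvF1 (cur ++ [d]) = pvF1 cur ++ d.1 := by
  simp [pvF1]
lemma pvF2_append (cur : List pvDay) (d : pvDay) : pvF2 (cur ++ [d]) = pvF2 cur ++ d.2.1 := by
  simp [pvF2]
lemma pvF3_append (cur : List pvDay) (d : pvDay) : pvF3 (cur ++ [d]) = pvF3 cur ++ d.2.2.1 := by
  simp [pvF3]

lemma pvF1_nil : pvF1 [] = [] := rfl
lemma pvF2_nil : pvF2 [] = [] := rfl
lemma pvF3_nil : pvF3 [] = [] := rfl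
lemma pvRender_nil : pvRender [] = [] := rfl

/-- Loop invariant: A's fold state is the rendering of B's fold state. -/
lemma pv_loop (ut : List pvDay) :
    ∀ (chs : List (List pvDay)) (cur : List pvDay) (tn : Int),
    List.foldl pvStepA (pvRender chs, pvF1 cur, pvF2 cur, pvF3 cur, ((chs.length : Int)), tn) ut
      = (pvRender (List.foldl pvStepB (chs, cur, ((pvF1 cur).length : Int)) ut).1,
         pvF1 (List.foldl pvStepB (chs, cur, ((pvF1 cur).length : Int)) ut).2.1,
         pvF2 (List.foldl pvStepB (chs, cur, ((pvF1 cur).length : Int)) ut).2.1,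
         pvF3 (List.foldl pvStepB (chs, cur, ((pvF1 cur).length : Int)) ut).2.1,
         (((List.foldl pvStepB (chs, cur, ((pvF1 cur).length : Int)) ut).1.length : Int)),
         tn + (((List.foldl pvStepB (chs, cur, ((pvF1 cur).length : Int)) ut).1.length : Int) - (chs.length : Int)))
    ∧ (List.foldl pvStepB (chs, cur, ((pvF1 cur).length : Int)) ut).2.2
      = ((pvF1 (List.foldl pvStepB (chs, cur, ((pvF1 cur).length : Int)) ut).2.1).length : Int) := by
  induction ut with
  | nil =>
    intro chs cur tn
    simp
  | cons day rest ih =>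
    intro chs cur tn
    have hlen : ((pvF1 cur).length : Int) + (day.1.length : Int) = ((pvF1 (cur ++ [day])).length : Int) := by
      simp [pvF1_append]
    by_cases h : ((pvF1 (cur ++ [day])).length : Int) ≥ 14
    · -- flush
      have h14 : (pvF1 cur ++ day.1).length ≥ 14 := by
        rw [← pvF1_append]; exact_mod_cast h
      have hacc : ((pvF1 cur).length : Int) + (day.1.length : Int) ≥ 14 := by rw [hlen]; exact h
      have hA : pvStepA (pvRender chs, pvF1 cur, pvF2 cur, pvF3 cur, ((chs.length : Int)), tn) day
          = (pvRender chs ++ [(pvF1 cur ++ day.1, pvF2 cur ++ day.2.1, pvF3 cur ++ day.2.2.1, ((chs.length : Int)))],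
             ([] : List Int), ([] : List Int), ([] : List Int), ((chs.length : Int)) + 1, tn + 1) := by
        simp only [pvStepA]; rw [if_pos h14]
      have hB : pvStepB (chs, cur, ((pvF1 cur).length : Int)) day
          = (chs ++ [cur ++ [day]], ([] : List pvDay), 0) := by
        simp only [pvStepB]; rw [if_pos hacc]
      have hstate :
          (pvRender chs ++ [(pvF1 cur ++ day.1, pvF2 cur ++ day.2.1, pvF3 cur ++ day.2.2.1, ((chs.length : Int)))],
           ([] : List Int), ([] : List Int), ([] : List Int), ((chs.length : Int)) + 1, tn + 1)
          = (pvRender (chs ++ [cur ++ [day]]), pvF1 [], pvF2 [], pvF3 [],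
             (((chs ++ [cur ++ [day]]).length : Int)), tn + 1) := by
        rw [pvRender_append, pvF1_append, pvF2_append, pvF3_append, pvF1_nil, pvF2_nil, pvF3_nil]
        simp
      rw [List.foldl_cons, List.foldl_cons, hA, hB, hstate]
      have hzero : (0 : Int) = ((pvF1 ([] : List pvDay)).length : Int) := by simp [pvF1_nil]
      rw [hzero]
      have ihx := ih (chs ++ [cur ++ [day]]) [] (tn + 1)
      refine ⟨?_, ihx.2⟩
      rw [ihx.1]
      refine Prod.ext rfl (Prod.ext rfl (Prod.ext rfl (Prod.ext rfl (Prod.ext rfl ?_))))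
      simp only [List.length_append, List.length_cons, List.length_nil]
      push_cast
      ring
    · -- no flush
      have h14 : ¬ (pvF1 cur ++ day.1).length ≥ 14 := by
        rw [← pvF1_append]; intro hc; exact h (by exact_mod_cast hc)
      have hacc : ¬ ((pvF1 cur).length : Int) + (day.1.length : Int) ≥ 14 := by rw [hlen]; exact h
      have hA : pvStepA (pvRender chs, pvF1 cur, pvF2 cur, pvF3 cur, ((chs.length : Int)), tn) day
          = (pvRender chs, pvF1 (cur ++ [day]), pvF2 (cur ++ [day]), pvF3 (cur ++ [day]),
             ((chs.length : Int)), tn) := by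
        simp only [pvStepA]; rw [if_neg h14, pvF1_append, pvF2_append, pvF3_append]
      have hB : pvStepB (chs, cur, ((pvF1 cur).length : Int)) day
          = (chs, cur ++ [day], ((pvF1 (cur ++ [day])).length : Int)) := by
        simp only [pvStepB]; rw [if_neg hacc, hlen]
      rw [List.foldl_cons, List.foldl_cons, hA, hB]
      exact ih chs (cur ++ [day]) tn

lemma pv_portA_eq (ut : List pvDay) (tn : Int) :
    merge_daily_to_twoweekly ut tn
      = (match List.foldl pvStepA ([], [], [], [], 0, tn) ut with
         | (weekly, wt, wtm, wc, idx, tn') =>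
           if wt.length > 7 then (weekly ++ [(wt, wtm, wc, idx)], tn' + 1) else (weekly, tn')) := rfl

lemma pv_portB_eq (ut : List pvDay) (tn : Int) :
    merge_daily_to_twoweekly_alt ut tn
      = (match List.foldl pvStepB ([], [], 0) ut with
         | (chunks, cur, acc) =>
           let chunks' := if acc > 7 then chunks ++ [cur] else chunks
           (pvRender chunks', tn + (chunks'.length : Int))) := rfl

-- ===== VERDICT (by name: the statement is the Claim_ definition above) =====
theorem merge_daily_to_twoweekly_spec : Claim_equal_merge_daily_to_twoweekly := by
  intro ut tn _
  unfold Spec_merge_daily_to_twoweekly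
  rw [pv_portA_eq, pv_portB_eq]
  have key := pv_loop ut [] [] tn
  simp only [pvRender_nil, pvF1_nil, pvF2_nil, pvF3_nil, List.length_nil, Nat.cast_zero,
    Int.sub_zero] at key
  rcases hB : List.foldl pvStepB ([], [], 0) ut with ⟨C, K, acc⟩
  rw [hB] at key
  dsimp only at key
  obtain ⟨keyA, keyAcc⟩ := key
  rw [keyA]
  dsimp only
  by_cases h7 : (pvF1 K).length > 7
  · have hc : acc > 7 := by rw [keyAcc]; exact_mod_cast h7
    rw [if_pos h7, if_pos hc, pvRender_append]
    refine Prod.ext rfl ?_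
    simp only [List.length_append, List.length_cons, List.length_nil]
    push_cast
    ring
  · have hc : ¬ acc > 7 := by rw [keyAcc]; intro hx; exact h7 (by exact_mod_cast hx)
    rw [if_neg h7, if_neg hc]
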